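-- pv_equiv track=rewrite | github.com/binlecode/co-cli | co_cli/display/_stream_renderer.py | _reduce_thinking
-- ===== SOURCE A (Python) =====
-- _PROGRESS_MAX_CHARS = 80
--
-- def _reduce_thinking(buffer: str) -> str:
--     """Extract the last complete sentence from the thinking buffer.
--
--     Scans for the last sentence boundary (. ? ! or newline), extracts
--     the sentence ending there, and truncates to _PROGRESS_MAX_CHARS.
--     Returns empty string if the buffer contains only whitespace or
--     there is no complete sentence boundary yet.
--     """
--     buf = buffer.strip()
--     if not buf:
--         return ""
--     # Find the last sentence boundary
--     last_end = -1
--     for i in range(len(buf) - 1, -1, -1):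
--         if buf[i] in '.?!\n':
--             last_end = i
--             break
--     if last_end < 0:
--         return ""
--     else:
--         # Extract just the last sentence
--         prev_end = -1
--         for i in range(last_end - 1, -1, -1):
--             if buf[i] in '.?!\n':
--                 prev_end = i
--                 break
--         sentence = buf[prev_end + 1:last_end + 1].strip()
--     if not sentence:
--         return ""
--     if len(sentence) > _PROGRESS_MAX_CHARS:
--         return sentence[:_PROGRESS_MAX_CHARS - 3] + "..."
--     return sentence
-- ===== SOURCE B (Python) =====
-- _PROGRESS_MAX_CHARS = 80
--
-- def _reduce_thinking(buffer: str) -> str: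
--     """One forward pass: split the stripped buffer into boundary-terminated
--     segments, then take the last segment as the sentence."""
--     parts = []
--     cur = []
--     for ch in buffer.strip():
--         cur.append(ch)
--         if ch in '.?!\n':
--             parts.append(''.join(cur))
--             cur = []
--     if not parts:
--         return ""
--     sentence = parts[-1].strip()
--     if not sentence:
--         return ""
--     if len(sentence) > _PROGRESS_MAX_CHARS:
--         return sentence[:_PROGRESS_MAX_CHARS - 3] + "..."
--     return sentence
-- ===== Notes on version B (the rewrite author's own statement) =====
-- stated objective: alternative
-- what changed: Replaces A's two backward scans for the last two sentence boundaries with a single forward pass that splits the stripped buffer into boundary-terminated segments and takes the last one.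
import Mathlib
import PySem

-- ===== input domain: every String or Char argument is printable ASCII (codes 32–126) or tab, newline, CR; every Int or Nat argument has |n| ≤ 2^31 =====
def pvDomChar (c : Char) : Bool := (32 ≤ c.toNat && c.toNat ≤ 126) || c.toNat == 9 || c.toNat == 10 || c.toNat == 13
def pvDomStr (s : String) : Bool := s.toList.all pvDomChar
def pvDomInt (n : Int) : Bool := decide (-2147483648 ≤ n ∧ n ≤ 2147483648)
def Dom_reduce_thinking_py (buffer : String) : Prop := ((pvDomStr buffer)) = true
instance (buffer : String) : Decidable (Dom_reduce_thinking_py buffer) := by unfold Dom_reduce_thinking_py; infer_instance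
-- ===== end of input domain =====

-- B replaces A's two targeted backward scans by one forward split into boundary-terminated
-- segments, selecting the last segment (objective: alternative decomposition, same cost).

-- ===== PORT A =====
-- c in '.?!\n'
def pvIsB (c : Char) : Bool := c == '.' || c == '?' || c == '!' || c == '\n'

-- A's backward for-loop with break: examine indices k, k-1, …, 0; first boundary index, else -1.
-- buf[i] is ported as getD (exact here: every index examined is in range).
def pvScanBackNat (l : List Char) : Nat → Int
  | 0 => if pvIsB (l.getD 0 ' ') then 0 else -1
  | k+1 => if pvIsB (l.getD (k+1) ' ') then ((k : Int) + 1) else pvScanBackNat l k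

-- range(i, -1, -1) is empty when i < 0 (the loop body never runs, the default -1 stands)
def pvScanBack (l : List Char) (i : Int) : Int := if i < 0 then -1 else pvScanBackNat l i.toNat

def reduce_thinking_py (buffer : String) : String :=
  let buf := (PySem.Str.strip buffer).toList
  if buf = [] then ""
  else
    let last_end := pvScanBack buf ((buf.length : Int) - 1)
    if last_end < 0 then ""
    else
      let prev_end := pvScanBack buf (last_end - 1)
      let sentence := PySem.Chars.strip (PySem.List.slice buf (some (prev_end + 1)) (some (last_end + 1)))
      if sentence = [] then ""
      else if (sentence.length : Int) > 80 then String.ofList (sentence.take 77 ++ "...".toList)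
      else String.ofList sentence

-- ===== PORT B =====
-- loop body of B: append ch to cur; on a boundary flush cur to parts
def pvSplitStep (st : List (List Char) × List Char) (c : Char) : List (List Char) × List Char :=
  let cur := st.2 ++ [c]
  if pvIsB c then (st.1 ++ [cur], []) else (st.1, cur)

def reduce_thinking_py_alt (buffer : String) : String :=
  let st := (PySem.Str.strip buffer).toList.foldl pvSplitStep ([], [])
  match st.1.getLast? with
  | none => ""
  | some seg =>
    let sentence := PySem.Chars.strip seg
    if sentence = [] then ""
    else if (sentence.length : Int) > 80 then String.ofList (sentence.take 77 ++ "...".toList)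
    else String.ofList sentence

-- ===== PRECONDITION & SPEC =====
def Spec_reduce_thinking_py (buffer : String) (out : String) : Prop := out = reduce_thinking_py_alt buffer
instance (buffer : String) (out : String) : Decidable (Spec_reduce_thinking_py buffer out) := by unfold Spec_reduce_thinking_py; infer_instance

-- ===== CLAIM (what is proved, stated in full; the proofs are below) =====
def Claim_equal_reduce_thinking_py : Prop := ∀ (buffer : String), Dom_reduce_thinking_py buffer → Spec_reduce_thinking_py buffer (reduce_thinking_py buffer)

-- ===== LEMMAS AND PROOFS =====

lemma pvGetD_append_lt (l : List Char) (c : Char) (k : Nat) (hk : k < l.length) :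
    (l ++ [c]).getD k ' ' = l.getD k ' ' := by
  rw [List.getD_eq_getElem?_getD, List.getD_eq_getElem?_getD, List.getElem?_append_left hk]

lemma pvGetD_append_self (l : List Char) (c : Char) : (l ++ [c]).getD l.length ' ' = c := by
  simp [List.getD_eq_getElem?_getD]

lemma pvScanBackNat_bounds (l : List Char) (k : Nat) :
    -1 ≤ pvScanBackNat l k ∧ pvScanBackNat l k ≤ (k : Int) := by
  induction k with
  | zero => simp only [pvScanBackNat]; split <;> omega
  | succ k ih => simp only [pvScanBackNat]; split; · omega
                 · push_cast; omega

lemma pvScanBackNat_append (l : List Char) (c : Char) (k : Nat) (hk : k < l.length) :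
    pvScanBackNat (l ++ [c]) k = pvScanBackNat l k := by
  induction k with
  | zero => simp only [pvScanBackNat, pvGetD_append_lt l c 0 hk]
  | succ k ih =>
    simp only [pvScanBackNat, pvGetD_append_lt l c (k+1) hk]
    split
    · rfl
    · exact ih (by omega)

lemma pvScanBack_bounds (l : List Char) (i : Int) :
    -1 ≤ pvScanBack l i ∧ pvScanBack l i ≤ max i (-1) := by
  unfold pvScanBack
  split
  · omega
  · have := pvScanBackNat_bounds l i.toNat
    omega

lemma pvScanBack_append (l : List Char) (c : Char) (i : Int) (h : i < (l.length : Int)) :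
    pvScanBack (l ++ [c]) i = pvScanBack l i := by
  unfold pvScanBack
  split
  · rfl
  · exact pvScanBackNat_append l c i.toNat (by omega)

-- top-level scan of l ++ [c] starting at its last index
lemma pvScanBack_top (l : List Char) (c : Char) :
    pvScanBack (l ++ [c]) ((l.length : Int)) =
      (if pvIsB c then (l.length : Int) else pvScanBack l ((l.length : Int) - 1)) := by
  have h1 : pvScanBack (l ++ [c]) ((l.length : Int)) = pvScanBackNat (l ++ [c]) l.length := by
    simp [pvScanBack]
  rw [h1]
  cases hn : l.length with
  | zero =>
    have hg : (l ++ [c]).getD 0 ' ' = c := by rw [← hn]; exact pvGetD_append_self l c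
    simp only [pvScanBackNat, hg]
    by_cases hc : pvIsB c
    · simp [hc]
    · norm_num [hc, pvScanBack]
  | succ k =>
    have hg : (l ++ [c]).getD (k+1) ' ' = c := by rw [← hn]; exact pvGetD_append_self l c
    simp only [pvScanBackNat, hg]
    by_cases hc : pvIsB c
    · rw [if_pos hc, if_pos hc]; push_cast; ring
    · rw [if_neg hc, if_neg hc, pvScanBackNat_append l c k (by omega)]
      have h2 : ((k+1 : Nat) : Int) - 1 = (k : Int) := by push_cast; ring
      rw [h2]
      simp [pvScanBack]

-- the candidate A extracts (slice between the two boundary scans) is B's last segment,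
-- and B's running 'cur' is exactly the suffix after the last boundary
lemma pvMain (l : List Char) :
    (l.foldl pvSplitStep ([], [])).2 = l.drop (pvScanBack l ((l.length : Int) - 1) + 1).toNat
    ∧ (l.foldl pvSplitStep ([], [])).1.getLast? =
      (if pvScanBack l ((l.length : Int) - 1) < 0 then none
       else some (PySem.List.slice l
          (some (pvScanBack l (pvScanBack l ((l.length : Int) - 1) - 1) + 1))
          (some (pvScanBack l ((l.length : Int) - 1) + 1)))) := by
  induction l using List.reverseRecOn with
  | nil => simp [pvScanBack]
  | append_singleton l c ih =>
    obtain ⟨ihcur, ihlast⟩ := ih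
    have hlen : ((l ++ [c]).length : Int) - 1 = (l.length : Int) := by simp
    have hfold : (l ++ [c]).foldl pvSplitStep ([], []) =
        pvSplitStep (l.foldl pvSplitStep ([], [])) c := by
      simp [List.foldl_append]
    have hpb := pvScanBack_bounds l ((l.length : Int) - 1)
    set p := pvScanBack l ((l.length : Int) - 1) with hpdef
    have hple : p ≤ (l.length : Int) - 1 ∧ -1 ≤ p := by
      rcases hpb with ⟨h1, h2⟩
      constructor
      · rcases Nat.eq_zero_or_pos l.length with h | h
        · simp [h] at h2 ⊢; omega
        · omega
      · exact h1
    by_cases hb : pvIsB c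
    · -- boundary char: segment flushed
      have hTop : pvScanBack (l ++ [c]) ((l.length : Int)) = (l.length : Int) := by
        rw [pvScanBack_top, if_pos hb]
      have hPrev : pvScanBack (l ++ [c]) ((l.length : Int) - 1) = p := by
        rw [hpdef]; exact pvScanBack_append l c _ (by omega)
      constructor
      · rw [hfold]
        simp [pvSplitStep, hb]
        rw [hTop]
      · rw [hfold]
        simp [pvSplitStep, hb]
        rw [hTop, hPrev]
        refine ⟨by omega, ?_⟩
        rw [PySem.List.slice_toNat _ (by omega) (by omega)]
        have ha : (p + 1).toNat ≤ l.length := by omega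
        rw [List.drop_append_of_le_length ha, ihcur]
        exact (List.take_of_length_le (by simp; omega)).symm
    · -- ordinary char: parts unchanged, cur grows
      have hTop : pvScanBack (l ++ [c]) ((l.length : Int)) = p := by
        rw [pvScanBack_top, if_neg hb]
      constructor
      · rw [hfold]
        simp [pvSplitStep, hb]
        rw [hTop, ihcur]
        exact (List.drop_append_of_le_length (by omega)).symm
      · rw [hfold]
        simp [pvSplitStep, hb]
        rw [hTop, ihlast]
        by_cases hp0 : p < 0
        · rw [if_pos hp0, if_pos hp0]
        · rw [if_neg hp0, if_neg hp0]
          have hq := pvScanBack_bounds l (p - 1)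
          have hPrev : pvScanBack (l ++ [c]) (p - 1) = pvScanBack l (p - 1) :=
            pvScanBack_append l c _ (by omega)
          rw [hPrev]
          set q := pvScanBack l (p - 1) with hqdef
          congr 1
          rw [PySem.List.slice_toNat _ (by omega) (by omega),
              PySem.List.slice_toNat _ (by omega) (by omega)]
          have ha : (q + 1).toNat ≤ l.length := by omega
          rw [List.drop_append_of_le_length ha]
          exact (List.take_append_of_le_length (by simp; omega)).symm

-- ===== VERDICT (by name: the statement is the Claim_ definition above) =====
theorem reduce_thinking_py_spec : Claim_equal_reduce_thinking_py := by
  intro buffer _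
  unfold Spec_reduce_thinking_py reduce_thinking_py reduce_thinking_py_alt
  dsimp only
  obtain ⟨hcur, hlast⟩ := pvMain (PySem.Str.strip buffer).toList
  rw [hlast]
  by_cases hnil : (PySem.Str.strip buffer).toList = []
  · rw [hnil]
    norm_num [pvScanBack]
  · rw [if_neg hnil]
    by_cases hneg : pvScanBack (PySem.Str.strip buffer).toList ((((PySem.Str.strip buffer).toList.length : Nat) : Int) - 1) < 0
    · rw [if_pos hneg, if_pos hneg]
    · rw [if_neg hneg, if_neg hneg]
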